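-- pv_equiv track=rewrite | github.com/SauersML/Clast | clast.py | run_mask
-- ===== SOURCE A (Python) =====
-- def run_mask(seq):
--     # Masks homopolymer runs so that long single-symbol stretches don't dominate
--     n = len(seq)
--     if n == 0:
--         return [False] * 0
--     # threshold scales gently with length; minimum of eight
--     thr = max(8, int(0.04 * n))
--     mask = [False] * n
--     i = 0
--     while i < n:
--         j = i + 1
--         while j < n and seq[j] == seq[i]:
--             j += 1
--         run_len = j - i
--         if run_len >= thr:
--             for k in range(i, j):
--                 mask[k] = True
--         i = j
--     return mask
-- ===== SOURCE B (Python) =====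
-- def run_mask(seq):
--     # Masks homopolymer runs so that long single-symbol stretches don't dominate.
--     # Per-position DP: combine forward and backward same-symbol stretch lengths.
--     n = len(seq)
--     if n == 0:
--         return []
--     thr = max(8, int(0.04 * n))
--
--     def stretches(chars):
--         # out[k]: length of the same-symbol stretch ending at position k
--         out, run, prev = [], 0, None
--         for c in chars:
--             run = run + 1 if c == prev else 1
--             out.append(run)
--             prev = c
--         return out
--
--     left = stretches(seq)                # stretch ending at i
--     right = stretches(seq[::-1])[::-1]   # stretch starting at i
--     # the maximal run through i has length left[i] + right[i] - 1
--     return [a + b - 1 >= thr for a, b in zip(left, right)]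
-- ===== Notes on version B (the rewrite author's own statement) =====
-- stated objective: alternative
-- what changed: Replaces A's explicit run segmentation (two-pointer scan finding each run's boundaries plus a separate index-marking loop over a preallocated [False]*n) with a per-position dynamic program: a forward sweep computing the same-symbol stretch length ending at each index, a backward sweep computing the stretch length starting there, and a pointwise combine left[i]+right[i]-1 >= thr; no run boundaries or index marking anywhere.
import Mathlib
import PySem

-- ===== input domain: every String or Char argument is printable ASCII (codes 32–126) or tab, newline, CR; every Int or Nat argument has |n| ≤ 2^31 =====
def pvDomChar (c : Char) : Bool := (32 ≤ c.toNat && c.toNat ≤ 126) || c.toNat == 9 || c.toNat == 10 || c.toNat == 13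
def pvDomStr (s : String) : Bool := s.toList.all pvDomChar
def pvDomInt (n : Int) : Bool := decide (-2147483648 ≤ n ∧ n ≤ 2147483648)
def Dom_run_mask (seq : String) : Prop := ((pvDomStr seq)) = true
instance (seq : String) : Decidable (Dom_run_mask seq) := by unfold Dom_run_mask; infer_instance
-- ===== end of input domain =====

-- B replaces A's run segmentation (two-pointer scan + index-marking loop) with a per-position
-- dynamic program: forward and backward same-symbol stretch lengths combined pointwise (objective: alternative).

-- ===== PORT A =====
-- Exact model of Python's `int(0.04 * n)` for 0 ≤ n ≤ 2^31: the IEEE-754 double 0.04 is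
-- 5764607523034235/2^57; the product is rounded to nearest-even at 53 significant bits, then truncated.
def pyTrunc004 (n : Int) : Int :=
  if n ≤ 0 then 0
  else
    let a : Nat := (5764607523034235 * n).toNat
    let s : Nat := Nat.log2 a - 52
    let m0 : Nat := a >>> s
    let r : Nat := a - (m0 <<< s)
    let m : Nat := if 0 < s ∧ (2 ^ s < 2 * r ∨ (2 * r = 2 ^ s ∧ m0 % 2 = 1)) then m0 + 1 else m0
    ((m >>> (57 - s) : Nat) : Int)

-- inner while loop: `while j < n and seq[j] == seq[i]: j += 1` (c = seq[i])
def innerScan (cs : List Char) (c : Char) (j : Nat) : Nat :=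
  if h : j < cs.length then
    if cs[j] == c then innerScan cs c (j + 1) else j
  else j
termination_by cs.length - j

-- `for k in range(i, j): mask[k] = True`
def setRange (mask : List Bool) (k j : Nat) : List Bool :=
  if k < j then setRange (mask.set k true) (k + 1) j else mask
termination_by j - k

theorem innerScan_ge (cs : List Char) (c : Char) (j : Nat) : j ≤ innerScan cs c j := by
  fun_induction innerScan cs c j with
  | case1 j h hc ih => omega
  | case2 j h hc => omega
  | case3 j h => omega

-- outer while loop of A
def aLoop (cs : List Char) (thr : Int) (i : Nat) (mask : List Bool) : List Bool :=
  if h : i < cs.length then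
    let j := innerScan cs cs[i] (i + 1)
    let mask' := if thr ≤ ((j : Int) - (i : Int)) then setRange mask i j else mask
    aLoop cs thr j mask'
  else mask
termination_by cs.length - i
decreasing_by
  have := innerScan_ge cs cs[i] (i + 1)
  omega

def run_mask (seq : String) : List Bool :=
  let cs := seq.toList
  let n := cs.length
  if n = 0 then []
  else
    let thr : Int := max 8 (pyTrunc004 (n : Int))
    aLoop cs thr 0 (List.replicate n false)

-- ===== PORT B =====
-- helper `stretches(chars)` of Source B: running same-symbol stretch length, state = (prev, run)
def stretches (prev : Option Char) (run : Nat) : List Char → List Nat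
  | [] => []
  | c :: rest =>
    let run' := if some c == prev then run + 1 else 1
    run' :: stretches (some c) run' rest

def run_mask_alt (seq : String) : List Bool :=
  let cs := seq.toList
  let n := cs.length
  if n = 0 then []
  else
    let thr : Int := max 8 (pyTrunc004 (n : Int))
    let left := stretches none 0 cs
    let right := (stretches none 0 cs.reverse).reverse
    (left.zip right).map (fun p => decide (thr ≤ (p.1 : Int) + (p.2 : Int) - 1))

-- ===== PRECONDITION & SPEC =====
def Spec_run_mask (seq : String) (out : List Bool) : Prop := out = run_mask_alt seq
instance (seq : String) (out : List Bool) : Decidable (Spec_run_mask seq out) := by unfold Spec_run_mask; infer_instance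

-- ===== CLAIM (what is proved, stated in full; the proofs are below) =====
def Claim_equal_run_mask : Prop := ∀ (seq : String), Dom_run_mask seq → Spec_run_mask seq (run_mask seq)

-- ===== LEMMAS AND PROOFS =====

-- length of the maximal run of `c` at the head of `xs`, and the remainder
def takeRun (c : Char) : List Char → Nat × List Char
  | [] => (0, [])
  | x :: xs => if x == c then let t := takeRun c xs; (t.1 + 1, t.2) else (0, x :: xs)

theorem takeRun_snd_length_le (c : Char) (xs : List Char) : (takeRun c xs).2.length ≤ xs.length := by
  induction xs with
  | nil => simp [takeRun]
  | cons x xs ih =>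
    by_cases h : x == c <;> simp [takeRun, h]
    exact Nat.le_succ_of_le (by simpa using ih)

-- the common run-wise characterisation of the mask
def maskRuns (thr : Int) : List Char → List Bool
  | [] => []
  | c :: xs =>
    let t := takeRun c xs
    List.replicate (t.1 + 1) (decide (thr ≤ ((t.1 + 1 : Nat) : Int))) ++ maskRuns thr t.2
termination_by l => l.length
decreasing_by
  have := takeRun_snd_length_le c xs
  simpa using Nat.lt_succ_of_le this

theorem innerScan_eq_takeRun (cs : List Char) (c : Char) :
    ∀ (u : List Char) (j : Nat), cs.drop j = u →
      innerScan cs c j = j + (takeRun c u).1 ∧ cs.drop (j + (takeRun c u).1) = (takeRun c u).2 := by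
  intro u
  induction u with
  | nil =>
    intro j hd
    have hlen : cs.length ≤ j := by
      have := List.drop_eq_nil_iff.mp hd
      omega
    constructor
    · unfold innerScan; simp [takeRun, Nat.not_lt.mpr hlen]
    · simp [takeRun, hd]
  | cons x xs ih =>
    intro j hd
    have hj : j < cs.length := by
      by_contra h
      rw [List.drop_eq_nil_iff.mpr (by omega)] at hd
      simp at hd
    have hget : cs[j]? = some x := by
      have h0 : (cs.drop j)[0]? = some x := by rw [hd]; rfl
      rw [List.getElem?_drop] at h0
      simpa using h0
    have hgetE : cs[j] = x := by
      rw [List.getElem?_eq_getElem hj] at hget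
      exact Option.some_inj.mp hget
    have hd' : cs.drop (j + 1) = xs := by
      have := List.tail_drop (l := cs) (i := j)
      rw [hd] at this
      simpa using this.symm
    by_cases hc : x == c
    · have := ih (j + 1) hd'
      constructor
      · unfold innerScan
        simp only [hj, dif_pos, hgetE, hc, if_true]
        rw [this.1]
        simp [takeRun, hc]
        omega
      · simp only [takeRun, hc, if_true]
        have h2 := this.2
        have : j + ((takeRun c (x :: xs)).1) = (j + 1) + (takeRun c xs).1 := by
          simp [takeRun, hc]; omega
        simpa [takeRun, hc, Nat.add_assoc, Nat.add_comm 1] using h2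
    · constructor
      · unfold innerScan
        simp [hj, hgetE, hc, takeRun]
      · simp [takeRun, hc, hd]

theorem setRange_eq (mask : List Bool) (k j : Nat) (hk : k ≤ j) (hj : j ≤ mask.length) :
    setRange mask k j = mask.take k ++ List.replicate (j - k) true ++ mask.drop j := by
  fun_induction setRange mask k j with
  | case1 mask k hlt ih =>
    have hlen : (mask.set k true).length = mask.length := by simp
    have hkl : k < mask.length := by omega
    rw [ih (by omega) (by omega)]
    have hdrop : (mask.set k true).drop j = mask.drop j := by
      rw [List.drop_set]
      simp [hlt]
    have htk : List.take k (mask.set k true) = List.take k mask := by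
      rw [List.take_set]
      apply List.set_eq_of_length_le
      simp
    have hgk : (mask.set k true)[k]? = some true := by
      rw [List.getElem?_set_self]
      simp [hkl]
    have htake : (mask.set k true).take (k + 1) = mask.take k ++ [true] := by
      rw [List.take_add_one, htk, hgk]
      rfl
    rw [htake, hdrop]
    have hrep : List.replicate (j - k) true = true :: List.replicate (j - (k + 1)) true := by
      have : j - k = (j - (k + 1)) + 1 := by omega
      rw [this, List.replicate_succ]
    rw [hrep]
    simp
  | case2 mask k hlt =>
    have : j = k := by omega
    subst this
    simp

theorem innerScan_le (cs : List Char) (c : Char) : ∀ j, j ≤ cs.length → innerScan cs c j ≤ cs.length := by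
  intro j
  fun_induction innerScan cs c j with
  | case1 j h1 hc ih => intro _; exact ih (by omega)
  | case2 j h1 hc => omega
  | case3 j h1 => omega

theorem drop_cons_info (cs : List Char) (x : Char) (xs : List Char) (j : Nat)
    (hd : cs.drop j = x :: xs) :
    ∃ h : j < cs.length, cs[j] = x ∧ cs.drop (j + 1) = xs := by
  have hj : j < cs.length := by
    by_contra h
    rw [List.drop_eq_nil_iff.mpr (by omega)] at hd
    simp at hd
  refine ⟨hj, ?_, ?_⟩
  · have h0 : (cs.drop j)[0]? = some x := by rw [hd]; rfl
    rw [List.getElem?_drop] at h0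
    simp only [Nat.add_zero] at h0
    rw [List.getElem?_eq_getElem hj] at h0
    exact Option.some_inj.mp h0
  · have := List.tail_drop (l := cs) (i := j)
    rw [hd] at this
    simpa using this.symm

theorem aLoop_eq (cs : List Char) (thr : Int) :
    ∀ (N : Nat) (u : List Char) (i : Nat) (mask : List Bool), u.length ≤ N → cs.drop i = u →
      mask.length = cs.length → mask.drop i = List.replicate (cs.length - i) false →
      aLoop cs thr i mask = mask.take i ++ maskRuns thr u := by
  intro N
  induction N with
  | zero =>
    intro u i mask hN hd hlen hfalse
    have hu : u = [] := by
      cases u with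
      | nil => rfl
      | cons a b => simp at hN
    subst hu
    have hle : cs.length ≤ i := by
      have := List.drop_eq_nil_iff.mp hd
      omega
    have hml : mask.length ≤ i := by omega
    rw [aLoop]
    simp [maskRuns, Nat.not_lt.mpr hle, List.take_of_length_le hml]
  | succ N ih =>
    intro u i mask hN hd hlen hfalse
    cases u with
    | nil =>
      have hle : cs.length ≤ i := by
        have := List.drop_eq_nil_iff.mp hd
        omega
      have hml : mask.length ≤ i := by omega
      rw [aLoop]
      simp [maskRuns, Nat.not_lt.mpr hle, List.take_of_length_le hml]
    | cons c us =>
      obtain ⟨hi, hget, hd'⟩ := drop_cons_info cs c us i hd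
      obtain ⟨hj1, hd2⟩ := innerScan_eq_takeRun cs c us (i + 1) hd'
      have hjle : innerScan cs c (i + 1) ≤ cs.length := innerScan_le cs c (i + 1) (by omega)
      set k := (takeRun c us).1 with hk
      set rest := (takeRun c us).2 with hrest
      have hjv : innerScan cs c (i + 1) = i + 1 + k := hj1
      have hjle' : i + 1 + k ≤ cs.length := by omega
      have htail : us.length ≤ N := by simp only [List.length_cons] at hN; omega
      have hrestN : rest.length ≤ N := le_trans (takeRun_snd_length_le c us) htail
      have hddrop : cs.drop (i + 1 + k) = rest := by simpa using hd2
      have hcast : ((i + 1 + k : Nat) : Int) - ((i : Nat) : Int) = ((k + 1 : Nat) : Int) := by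
        push_cast; omega
      rw [aLoop]
      simp only [hi, dif_pos, hget, hjv, hcast]
      have hdropfalse : mask.drop (i + 1 + k) = List.replicate (cs.length - (i + 1 + k)) false := by
        have h1 : mask.drop (i + 1 + k) = (mask.drop i).drop (k + 1) := by
          rw [List.drop_drop]; congr 1; omega
        rw [h1, hfalse, List.drop_replicate]
        congr 1; omega
      by_cases hth : thr ≤ ((k + 1 : Nat) : Int)
      · simp only [hth, if_true]
        have hsr : setRange mask i (i + 1 + k)
            = mask.take i ++ List.replicate (k + 1) true ++ mask.drop (i + 1 + k) := by
          rw [setRange_eq mask i (i + 1 + k) (by omega) (by omega)]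
          have h2 : i + 1 + k - i = k + 1 := by omega
          rw [h2]
        set A := mask.take i ++ List.replicate (k + 1) true with hA
        have hAlen : A.length = i + 1 + k := by
          simp [hA, List.length_take]
          omega
        have hlen' : (setRange mask i (i + 1 + k)).length = cs.length := by
          rw [hsr]
          simp
          omega
        have hdrop' : (setRange mask i (i + 1 + k)).drop (i + 1 + k)
            = List.replicate (cs.length - (i + 1 + k)) false := by
          rw [hsr, ← hAlen, List.drop_left, hAlen, hdropfalse]
        rw [ih rest (i + 1 + k) (setRange mask i (i + 1 + k)) hrestN hddrop hlen' hdrop']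
        have htake' : (setRange mask i (i + 1 + k)).take (i + 1 + k) = A := by
          rw [hsr, ← hAlen, List.take_left]
        rw [htake', hA]
        simp only [maskRuns, ← hk, ← hrest]
        rw [decide_eq_true hth]
        simp [List.append_assoc]
      · simp only [hth, if_false]
        rw [ih rest (i + 1 + k) mask hrestN hddrop hlen hdropfalse]
        have htake : mask.take (i + 1 + k) = mask.take i ++ List.replicate (k + 1) false := by
          have h1 : i + 1 + k = i + (k + 1) := by omega
          rw [h1, List.take_add, hfalse, List.take_replicate]
          congr 2
          omega
        rw [htake]
        simp only [maskRuns, ← hk, ← hrest]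
        rw [decide_eq_false hth]
        simp [List.append_assoc]

-- ===== B-side lemmas: run-length encoding and the two stretch sweeps =====

-- run-length encoding of a character list, built from takeRun
def rle : List Char → List (Char × Nat)
  | [] => []
  | c :: xs => (c, (takeRun c xs).1 + 1) :: rle (takeRun c xs).2
termination_by l => l.length
decreasing_by
  have := takeRun_snd_length_le c xs
  simpa using Nat.lt_succ_of_le this

theorem takeRun_decomp (c : Char) (xs : List Char) :
    xs = List.replicate (takeRun c xs).1 c ++ (takeRun c xs).2 ∧
      (∀ y, (takeRun c xs).2.head? = some y → y ≠ c) := by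
  induction xs with
  | nil => simp [takeRun]
  | cons x xs ih =>
    by_cases h : x == c
    · have hx : x = c := by simpa using h
      subst hx
      simp only [takeRun, beq_self_eq_true, if_true]
      refine ⟨?_, ih.2⟩
      conv_lhs => rw [ih.1]
      simp [List.replicate_succ]
    · have hx : x ≠ c := by simpa using h
      simp [takeRun, h]
      intro hy; exact absurd hy hx

theorem maskRuns_eq_rle (thr : Int) : ∀ (N : Nat) (cs : List Char), cs.length ≤ N →
    maskRuns thr cs = (rle cs).flatMap (fun p => List.replicate p.2 (decide (thr ≤ (p.2 : Int)))) := by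
  intro N
  induction N with
  | zero =>
    intro cs h
    have : cs = [] := List.length_eq_zero_iff.mp (by omega)
    subst this; simp [maskRuns, rle]
  | succ N ih =>
    intro cs h
    cases cs with
    | nil => simp [maskRuns, rle]
    | cons c xs =>
      have hr : (takeRun c xs).2.length ≤ N := by
        have := takeRun_snd_length_le c xs
        simp only [List.length_cons] at h
        omega
      rw [maskRuns, rle]
      simp only [List.flatMap_cons]
      rw [ih _ hr]

theorem stretches_run (c : Char) (k : Nat) (xs : List Char) :
    stretches (some c) k xs
      = List.range' (k + 1) (takeRun c xs).1 ++ stretches none 0 (takeRun c xs).2 := by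
  induction xs generalizing k with
  | nil => simp [stretches, takeRun]
  | cons x t ih =>
    by_cases h : x == c
    · have hx : x = c := by simpa using h
      subst hx
      simp only [takeRun, beq_self_eq_true, if_true]
      rw [stretches]
      simp only [Option.some.injEq, beq_self_eq_true, if_true]
      rw [ih (k + 1), List.range'_succ]
      rfl
    · have hb : (x == c) = false := by simpa using h
      rw [show takeRun c (x :: t) = (0, x :: t) from by simp [takeRun, hb]]
      simp only [List.range'_zero, List.nil_append]
      rw [stretches, stretches]
      have h1 : (some x == some c) = false := by simpa using hb
      have h2 : (some x == (none : Option Char)) = false := rfl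
      simp [h1, h2]

theorem stretches_eq_rle : ∀ (N : Nat) (cs : List Char), cs.length ≤ N →
    stretches none 0 cs = (rle cs).flatMap (fun p => List.range' 1 p.2) := by
  intro N
  induction N with
  | zero =>
    intro cs h
    have : cs = [] := List.length_eq_zero_iff.mp (by omega)
    subst this; simp [stretches, rle]
  | succ N ih =>
    intro cs h
    cases cs with
    | nil => simp [stretches, rle]
    | cons c xs =>
      have hr : (takeRun c xs).2.length ≤ N := by
        have := takeRun_snd_length_le c xs
        simp only [List.length_cons] at h
        omega
      rw [rle]
      simp only [List.flatMap_cons]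
      rw [stretches]
      have h2 : (some c == (none : Option Char)) = false := by rfl
      simp only [h2, Bool.false_eq_true, if_false]
      rw [stretches_run, ih _ hr, List.range'_succ]
      rfl

theorem takeRun_replicate_append (c : Char) (m : Nat) (v : List Char)
    (hv : ∀ y, v.head? = some y → y ≠ c) :
    takeRun c (List.replicate m c ++ v) = (m, v) := by
  induction m with
  | zero =>
    simp only [List.replicate_zero, List.nil_append]
    cases v with
    | nil => rfl
    | cons y ys =>
      have : y ≠ c := hv y rfl
      simp [takeRun, this]
  | succ m ih =>
    simp only [List.replicate_succ, List.cons_append, takeRun, beq_self_eq_true, if_true, ih]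

theorem rle_replicate (c : Char) (k : Nat) (hk : 1 ≤ k) :
    rle (List.replicate k c) = [(c, k)] := by
  obtain ⟨k', rfl⟩ : ∃ k', k = k' + 1 := ⟨k - 1, by omega⟩
  rw [List.replicate_succ, rle]
  have h := takeRun_replicate_append c k' ([] : List Char) (by simp)
  simp only [List.append_nil] at h
  rw [h]
  simp [rle]

theorem rle_append_run : ∀ (N : Nat) (u : List Char) (c : Char) (k : Nat), u.length ≤ N → 1 ≤ k →
    (∀ y, u.getLast? = some y → y ≠ c) →
    rle (u ++ List.replicate k c) = rle u ++ [(c, k)] := by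
  intro N
  induction N with
  | zero =>
    intro u c k hN hk hlast
    have : u = [] := List.length_eq_zero_iff.mp (by omega)
    subst this
    simp [rle_replicate c k hk, rle]
  | succ N ih =>
    intro u c k hN hk hlast
    cases u with
    | nil => simp [rle_replicate c k hk, rle]
    | cons d us =>
      obtain ⟨hdec, hhead⟩ := takeRun_decomp d us
      set m := (takeRun d us).1 with hm
      set rest := (takeRun d us).2 with hrestdef
      have hrest_len : rest.length ≤ us.length := by
        have h2 := takeRun_snd_length_le d us
        rw [← hrestdef] at h2
        exact h2
      have hulast : ((d :: us).getLast? = (List.replicate (m + 1) d ++ rest).getLast?) := by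
        conv_lhs => rw [show d :: us = List.replicate (m+1) d ++ rest by
          rw [List.replicate_succ]; simp [← hdec]]
      by_cases hrnil : rest = []
      · -- u is a single run of d; d ≠ c from the last-element hypothesis
        have hud : d ≠ c := by
          apply hlast
          rw [hulast, hrnil]
          simp [List.getLast?_replicate]
        have harr : d :: us ++ List.replicate k c
            = d :: (List.replicate m d ++ List.replicate k c) := by
          simp [hdec, hrnil]
        rw [harr, rle]
        have ht : takeRun d (List.replicate m d ++ List.replicate k c) = (m, List.replicate k c) := by
          apply takeRun_replicate_append
          intro y hy
          obtain ⟨k', rfl⟩ : ∃ k', k = k' + 1 := ⟨k - 1, by omega⟩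
          rw [List.replicate_succ] at hy
          simp at hy
          subst hy
          exact fun hcontra => hud hcontra.symm
        rw [ht]
        simp only
        rw [rle_replicate c k hk]
        rw [rle]
        have ht2 : takeRun d us = (m, []) := by rw [← hrnil, hm, hrestdef]
        rw [ht2]
        simp [hrnil, rle]
      · -- rest nonempty: u's last element is rest's last
        have hrlast : ∀ y, rest.getLast? = some y → y ≠ c := by
          intro y hy
          apply hlast
          rw [hulast]
          rw [List.getLast?_append_of_ne_nil _ hrnil]
          exact hy
        have harr : d :: us ++ List.replicate k c
            = d :: (List.replicate m d ++ (rest ++ List.replicate k c)) := by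
          simp [hdec]
        rw [harr, rle]
        have hhead' : ∀ y, (rest ++ List.replicate k c).head? = some y → y ≠ d := by
          intro y hy
          apply hhead y
          cases hcase : rest with
          | nil => exact absurd hcase hrnil
          | cons r rs =>
            rw [hcase] at hy
            simpa using hy
        have ht : takeRun d (List.replicate m d ++ (rest ++ List.replicate k c))
            = (m, rest ++ List.replicate k c) := takeRun_replicate_append d m _ hhead'
        rw [ht]
        simp only
        rw [ih rest c k (by simp at hN; omega) hk hrlast]
        rw [rle]
        have ht2 : takeRun d us = (m, rest) := by rw [hm, hrestdef]
        rw [ht2]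
        simp

theorem rle_reverse : ∀ (N : Nat) (cs : List Char), cs.length ≤ N →
    rle cs.reverse = (rle cs).reverse := by
  intro N
  induction N with
  | zero =>
    intro cs h
    have : cs = [] := List.length_eq_zero_iff.mp (by omega)
    subst this; simp [rle]
  | succ N ih =>
    intro cs h
    cases cs with
    | nil => simp [rle]
    | cons c xs =>
      obtain ⟨hdec, hhead⟩ := takeRun_decomp c xs
      set m := (takeRun c xs).1 with hm
      set rest := (takeRun c xs).2 with hrestdef
      have hcs : c :: xs = List.replicate (m + 1) c ++ rest := by
        rw [List.replicate_succ]; simp [← hdec]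
      have hrev : (c :: xs).reverse = rest.reverse ++ List.replicate (m + 1) c := by
        rw [hcs]; simp
      have hrest_len : rest.length ≤ N := by
        have h2 := takeRun_snd_length_le c xs
        rw [← hrestdef] at h2
        simp only [List.length_cons] at h
        omega
      rw [hrev, rle_append_run (rest.reverse.length) rest.reverse c (m + 1) le_rfl (by omega)]
      · have h3 := ih rest.reverse (by simpa using hrest_len)
        rw [List.reverse_reverse] at h3
        have h4 : rle rest.reverse = (rle rest).reverse := by
          rw [h3, List.reverse_reverse]
        rw [h4, rle]
        rw [show takeRun c xs = (m, rest) from by rw [hm, hrestdef]]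
        simp
      · intro y hy
        rw [List.getLast?_reverse] at hy
        exact hhead y hy

-- zip of two flatMaps with blockwise-equal lengths is the flatMap of blockwise zips
theorem zip_map_flatMap {α γ : Type} (f : α → List Nat) (g : α → List Nat)
    (h : Nat × Nat → γ) (l : List α) (hlen : ∀ p ∈ l, (f p).length = (g p).length) :
    ((l.flatMap f).zip (l.flatMap g)).map h = l.flatMap (fun p => ((f p).zip (g p)).map h) := by
  induction l with
  | nil => simp
  | cons a l ih =>
    simp only [List.flatMap_cons]
    rw [List.zip_append (by exact hlen a (by simp))]
    rw [List.map_append, ih (fun p hp => hlen p (by simp [hp]))]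

theorem reverse_flatMap_reverse {α β : Type} (f : α → List β) (l : List α) :
    (l.reverse.flatMap f).reverse = l.flatMap (fun x => (f x).reverse) := by
  induction l with
  | nil => simp
  | cons a l ih => simp [List.flatMap_append, ih]

-- per-run combination: ascending meets descending, sums are constant
theorem run_combine (thr : Int) (L : Nat) :
    ((List.range' 1 L).zip (List.range' 1 L).reverse).map
        (fun p => decide (thr ≤ (p.1 : Int) + (p.2 : Int) - 1))
      = List.replicate L (decide (thr ≤ (L : Int))) := by
  apply List.ext_getElem
  · simp
  · intro i h1 h2
    simp only [List.getElem_map, List.getElem_zip, List.getElem_reverse, List.getElem_range',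
      List.getElem_replicate]
    have hiL : i < L := by simp at h2; omega
    congr 1
    simp only [List.length_range']
    rw [eq_iff_iff]
    constructor <;> intro hx <;> omega

-- ===== VERDICT (by name: the statement is the Claim_ definition above) =====
theorem run_mask_spec : Claim_equal_run_mask := by
  unfold Claim_equal_run_mask
  intro seq _
  unfold Spec_run_mask run_mask run_mask_alt
  simp only
  by_cases h0 : seq.toList.length = 0
  · simp [h0]
  · simp only [h0, if_false]
    set cs := seq.toList with hcs
    set thr := max 8 (pyTrunc004 (cs.length : Int)) with hthr
    have hA : aLoop cs thr 0 (List.replicate cs.length false) = maskRuns thr cs := by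
      rw [aLoop_eq cs thr cs.length cs 0 (List.replicate cs.length false) le_rfl (by simp)
        (by simp) (by simp)]
      simp
    rw [hA]
    rw [maskRuns_eq_rle thr cs.length cs le_rfl]
    rw [stretches_eq_rle cs.length cs le_rfl]
    rw [stretches_eq_rle cs.reverse.length cs.reverse le_rfl]
    rw [rle_reverse cs.length cs le_rfl]
    rw [reverse_flatMap_reverse]
    rw [zip_map_flatMap (fun p => List.range' 1 p.2) (fun p => (List.range' 1 p.2).reverse)
      (fun p => decide (thr ≤ (p.1 : Int) + (p.2 : Int) - 1)) (rle cs) (by intro p _; simp)]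
    apply List.flatMap_congr
    intro p hp
    exact (run_combine thr p.2).symm
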